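-- pv_equiv track=rewrite | github.com/PaulGuo5/Leetcode-notes | notes/0168/0168.py | convertToTitle1
-- ===== SOURCE A (Python) =====
-- def convertToTitle1(n: int) -> str:
--     dict_ = {}
--     for i in range(26):
--         dict_[i+1] = chr(ord("A")+i)
--     dict_[0] = "Z"
--     res = ""
--     while n > 0:
--         n, q = divmod(n, 26)
--         if q == 0:
--             n-=1
--         res += dict_[q]
--     return res[::-1]
-- ===== SOURCE B (Python) =====
-- def convertToTitle1(n: int) -> str:
--     if n <= 0:
--         return ""
--     q, r = divmod(n - 1, 26)
--     return convertToTitle1(q) + chr(ord("A") + r)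
-- ===== Notes on version B (the rewrite author's own statement) =====
-- stated objective: simpler
-- what changed: Replaced the dict lookup table, the while loop with its zero-remainder correction branch, and the final string reversal by a direct recursion on divmod(n-1,26) that emits digits in forward order.
import Mathlib
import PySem

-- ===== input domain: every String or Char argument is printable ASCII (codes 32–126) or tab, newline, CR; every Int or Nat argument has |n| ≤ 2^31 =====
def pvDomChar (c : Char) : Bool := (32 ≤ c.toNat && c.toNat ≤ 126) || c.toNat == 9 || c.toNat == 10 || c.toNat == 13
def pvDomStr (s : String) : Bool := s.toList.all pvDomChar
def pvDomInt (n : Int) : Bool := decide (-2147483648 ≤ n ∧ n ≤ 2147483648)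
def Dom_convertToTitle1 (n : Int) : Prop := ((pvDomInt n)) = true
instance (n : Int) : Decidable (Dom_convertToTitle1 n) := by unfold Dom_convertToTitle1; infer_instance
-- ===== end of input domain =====

-- B replaces A's lookup table, while-loop with the zero-remainder correction and final reversal by a
-- direct recursion on divmod(n-1,26) emitting digits in forward order (objective: simpler).

-- ===== PORT A =====
-- dict_ : {1:'A', …, 26:'Z'} then dict_[0] = 'Z' (overwrites nothing; 0 is a fresh key appended)
def pvDictA : PySem.Dict Int String :=
  ((List.range 26).foldl
      (fun d i => d.insert ((i : Int) + 1) (String.ofList [Char.ofNat (65 + i)]))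
      PySem.Dict.empty).insert 0 "Z"

-- the while loop; dict_[q] exists for every q = n % 26, so .getD "" never takes its default
def pvLoopA (n : Int) (res : String) : String :=
  if 0 < n then
    pvLoopA
      (if PySem.Int.mod n 26 = 0 then PySem.Int.floordiv n 26 - 1 else PySem.Int.floordiv n 26)
      (res ++ ((pvDictA.get? (PySem.Int.mod n 26)).getD ""))
  else res
termination_by n.toNat
decreasing_by
  rw [PySem.Int.floordiv_eq_ediv_of_pos (by norm_num), PySem.Int.mod_eq_emod_of_pos (by norm_num)]
  split_ifs <;> omega

def convertToTitle1 (n : Int) : String :=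
  (PySem.Str.slice? (pvLoopA n "") none none (-1)).getD ""   -- res[::-1]

-- ===== PORT B =====
def convertToTitle1_alt (n : Int) : String :=
  if n ≤ 0 then ""
  else
    convertToTitle1_alt (PySem.Int.floordiv (n - 1) 26) ++
      String.ofList [Char.ofNat (65 + (PySem.Int.mod (n - 1) 26).toNat)]
termination_by n.toNat
decreasing_by
  rw [PySem.Int.floordiv_eq_ediv_of_pos (by norm_num)]
  omega

-- ===== PRECONDITION & SPEC =====
def Spec_convertToTitle1 (n : Int) (out : String) : Prop := out = convertToTitle1_alt n
instance (n : Int) (out : String) : Decidable (Spec_convertToTitle1 n out) := by unfold Spec_convertToTitle1; infer_instance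

-- ===== CLAIM (what is proved, stated in full; the proofs are below) =====
def Claim_equal_convertToTitle1 : Prop := ∀ (n : Int), Dom_convertToTitle1 n → Spec_convertToTitle1 n (convertToTitle1 n)

-- ===== LEMMAS AND PROOFS =====

-- the table lookup, in closed form
lemma pvDictA_get (q : Int) (h0 : 0 ≤ q) (h1 : q < 26) :
    ((pvDictA.get? q).getD "") =
      String.ofList [Char.ofNat (65 + (if q = 0 then 25 else (q - 1).toNat))] := by
  interval_cases q <;> decide

lemma pvLoopA_spec (k : Nat) : ∀ (n : Int), n.toNat ≤ k → ∀ res : String,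
    (pvLoopA n res).toList = res.toList ++ (convertToTitle1_alt n).toList.reverse := by
  induction k with
  | zero =>
    intro n hn res
    have hle : n ≤ 0 := by omega
    rw [pvLoopA, convertToTitle1_alt]
    simp [hle, not_lt.mpr hle]
  | succ k ih =>
    intro n hn res
    by_cases hpos : 0 < n
    · have hq0 : 0 ≤ PySem.Int.mod n 26 := by
        rw [PySem.Int.mod_eq_emod_of_pos (by norm_num)]; omega
      have hq1 : PySem.Int.mod n 26 < 26 := by
        rw [PySem.Int.mod_eq_emod_of_pos (by norm_num)]; omega
      rw [pvLoopA]
      rw [if_pos hpos]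
      rw [pvDictA_get _ hq0 hq1]
      by_cases hz : PySem.Int.mod n 26 = 0
      · -- digit Z, next n is n/26 - 1 = (n-1)//26
        have hnext : PySem.Int.floordiv n 26 - 1 = PySem.Int.floordiv (n - 1) 26 := by
          rw [PySem.Int.floordiv_eq_ediv_of_pos (by norm_num),
              PySem.Int.floordiv_eq_ediv_of_pos (by norm_num)]
          rw [PySem.Int.mod_eq_emod_of_pos (by norm_num)] at hz
          omega
        have hdig : (PySem.Int.mod (n - 1) 26).toNat = 25 := by
          rw [PySem.Int.mod_eq_emod_of_pos (by norm_num)]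
          rw [PySem.Int.mod_eq_emod_of_pos (by norm_num)] at hz
          omega
        have hk : (PySem.Int.floordiv (n - 1) 26).toNat ≤ k := by
          rw [PySem.Int.floordiv_eq_ediv_of_pos (by norm_num)]; omega
        rw [if_pos hz, if_pos hz, hnext, ih _ hk]
        conv_rhs => rw [convertToTitle1_alt]
        rw [if_neg (not_le.mpr hpos), hdig]
        simp
      · -- digit chr(64 + n%26), next n is n/26 = (n-1)//26
        have hnext : PySem.Int.floordiv n 26 = PySem.Int.floordiv (n - 1) 26 := by
          rw [PySem.Int.floordiv_eq_ediv_of_pos (by norm_num),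
              PySem.Int.floordiv_eq_ediv_of_pos (by norm_num)]
          rw [PySem.Int.mod_eq_emod_of_pos (by norm_num)] at hz
          omega
        have hdig : (PySem.Int.mod (n - 1) 26).toNat = (PySem.Int.mod n 26 - 1).toNat := by
          rw [PySem.Int.mod_eq_emod_of_pos (by norm_num)]
          rw [PySem.Int.mod_eq_emod_of_pos (by norm_num)] at hz ⊢
          omega
        have hk : (PySem.Int.floordiv (n - 1) 26).toNat ≤ k := by
          rw [PySem.Int.floordiv_eq_ediv_of_pos (by norm_num)]; omega
        rw [if_neg hz, if_neg hz, hnext, ih _ hk]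
        conv_rhs => rw [convertToTitle1_alt]
        rw [if_neg (not_le.mpr hpos), hdig]
        simp
    · have hle : n ≤ 0 := by omega
      rw [pvLoopA, convertToTitle1_alt]
      simp [hle, hpos]

-- ===== VERDICT (by name: the statement is the Claim_ definition above) =====
theorem convertToTitle1_spec : Claim_equal_convertToTitle1 := by
  intro n _
  unfold Spec_convertToTitle1 convertToTitle1
  rw [PySem.Str.slice?_none_none_neg_one]
  have h := pvLoopA_spec n.toNat n le_rfl ""
  simp only [String.toList_empty, List.nil_append] at h
  simp [Option.getD, h]
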